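-- pv_equiv track=rewrite | github.com/KindLab/scDamAndTools | scripts/demultiplex.py | pseudoseq2prefix
-- ===== SOURCE A (Python) =====
-- from itertools import product, repeat, combinations, chain, groupby, accumulate
--
-- def prefix2pseudoseq(prefix):
--     return "".join((seq for (offset, seq) in prefix))
--
-- def pseudoseq2prefix(pseq, prefix):
--     l = len(prefix2pseudoseq(prefix))
--     assert l == len(pseq)
--     ol = [(o, len(seq)) for (o, seq) in prefix]
--     oo = [0] + list(accumulate([l for (_, l) in ol]))
--     assert oo[-1] == l
--     return tuple([
--         (o, pseq[a:b])
--         for ((o, _), (a, b)) in zip(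
--             ol,
--             zip(oo[:-1], oo[1:]),
--         )
--     ])
-- ===== SOURCE B (Python) =====
-- def pseudoseq2prefix(pseq, prefix):
--     # single running-cursor pass peeling segments off the front of pseq
--     assert sum(len(seq) for (_, seq) in prefix) == len(pseq)
--     out = []
--     rest = pseq
--     for (o, seq) in prefix:
--         n = len(seq)
--         out.append((o, rest[:n]))
--         rest = rest[n:]
--     return tuple(out)
-- ===== Notes on version B (the rewrite author's own statement) =====
-- stated objective: simpler
-- what changed: Replaces the precomputed accumulate offset table and the zip of its two shifted windows with one pass that peels each segment off the front of the string with a running cursor.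
import Mathlib
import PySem

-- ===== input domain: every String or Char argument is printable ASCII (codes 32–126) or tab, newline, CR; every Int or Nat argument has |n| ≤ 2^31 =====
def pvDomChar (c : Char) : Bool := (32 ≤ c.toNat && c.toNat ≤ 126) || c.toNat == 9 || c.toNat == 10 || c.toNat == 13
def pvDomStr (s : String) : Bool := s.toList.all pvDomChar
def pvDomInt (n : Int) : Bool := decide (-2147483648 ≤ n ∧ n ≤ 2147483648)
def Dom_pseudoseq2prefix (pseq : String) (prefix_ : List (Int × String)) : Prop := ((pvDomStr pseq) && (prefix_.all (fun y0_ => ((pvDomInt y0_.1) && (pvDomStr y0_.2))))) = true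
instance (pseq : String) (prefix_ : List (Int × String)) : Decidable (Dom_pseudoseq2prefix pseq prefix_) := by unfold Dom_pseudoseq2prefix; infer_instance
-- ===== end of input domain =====

-- B replaces A's accumulate offset table + zip-of-shifted-windows with one running-cursor pass
-- peeling each segment off the front of the string (objective: simpler).


-- ===== PORT A =====
-- "".join(seq for (offset, seq) in prefix), on code points
def prefix2pseudoseqA (prefix_ : List (Int × String)) : List Char :=
  prefix_.foldl (fun acc p => acc ++ p.2.toList) []

def pseudoseq2prefix (pseq : String) (prefix_ : List (Int × String)) : List (Int × String) :=
  let l : Int := (prefix2pseudoseqA prefix_).length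
  -- the assert 'l == len(pseq)' raises outside Pre_; under Pre_ it passes
  let ol : List (Int × Int) := prefix_.map (fun p => (p.1, (p.2.toList.length : Int)))
  -- oo = [0] + list(accumulate(lengths)); the assert 'oo[-1] == l' always passes
  let oo : List Int := List.scanl (· + ·) 0 (ol.map Prod.snd)
  let _ := l
  ((ol.zip (oo.dropLast.zip oo.tail)).map
    (fun x => (x.1.1, String.ofList (PySem.List.slice pseq.toList (some x.2.1) (some x.2.2)))))

-- ===== PORT B =====
-- running cursor: take the next segment off the front of the remaining characters
def pseudoseq2prefixGo : List Char → List (Int × String) → List (Int × String)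
  | _, [] => []
  | rest, (o, seq) :: t =>
      let n := seq.toList.length
      (o, String.ofList (rest.take n)) :: pseudoseq2prefixGo (rest.drop n) t

def pseudoseq2prefix_alt (pseq : String) (prefix_ : List (Int × String)) : List (Int × String) :=
  pseudoseq2prefixGo pseq.toList prefix_

-- ===== PRECONDITION & SPEC =====
-- A's assert raises AssertionError unless the segment lengths sum to len(pseq); Pre_ admits exactly
-- the inputs where A returns.
def Pre_pseudoseq2prefix (pseq : String) (prefix_ : List (Int × String)) : Prop :=
  (prefix_.map (fun p => p.2.toList.length)).sum = pseq.toList.length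
instance (pseq : String) (prefix_ : List (Int × String)) : Decidable (Pre_pseudoseq2prefix pseq prefix_) := by unfold Pre_pseudoseq2prefix; infer_instance

def pvWitness_pseudoseq2prefix : String × (List (Int × String)) := ("abcdef", [(1, "ab"), (3, "cde"), (0, "f")])

def Spec_pseudoseq2prefix (pseq : String) (prefix_ : List (Int × String)) (out : List (Int × String)) : Prop := out = pseudoseq2prefix_alt pseq prefix_
instance (pseq : String) (prefix_ : List (Int × String)) (out : List (Int × String)) : Decidable (Spec_pseudoseq2prefix pseq prefix_ out) := by unfold Spec_pseudoseq2prefix; infer_instance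

-- ===== CLAIM (what is proved, stated in full; the proofs are below) =====
def Claim_equal_pseudoseq2prefix : Prop := ∀ (pseq : String) (prefix_ : List (Int × String)), Dom_pseudoseq2prefix pseq prefix_ → Pre_pseudoseq2prefix pseq prefix_ → Spec_pseudoseq2prefix pseq prefix_ (pseudoseq2prefix pseq prefix_)

-- ===== LEMMAS AND PROOFS =====

-- every scanl is its initial value consed on some tail
lemma scanl_add_eq_cons (b : Int) (l : List Int) :
    ∃ tl, List.scanl (· + ·) b l = b :: tl := by
  cases l <;> simp [List.scanl_cons, List.scanl_nil]

-- A's zip-of-windows over the scanl offsets, started at offset a, equals B's peeling loop on cs.drop a.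
lemma key (pfx : List (Int × String)) (cs : List Char) (a : ℕ) :
    (((pfx.map (fun p => (p.1, (p.2.toList.length : Int)))).zip
       ((List.scanl (· + ·) (a : Int) ((pfx.map (fun p => (p.1, (p.2.toList.length : Int)))).map Prod.snd)).dropLast.zip
        (List.scanl (· + ·) (a : Int) ((pfx.map (fun p => (p.1, (p.2.toList.length : Int)))).map Prod.snd)).tail)).map
      (fun x => (x.1.1, String.ofList (PySem.List.slice cs (some x.2.1) (some x.2.2)))))
    = pseudoseq2prefixGo (cs.drop a) pfx := by
  induction pfx generalizing a with
  | nil => simp [pseudoseq2prefixGo]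
  | cons h t ih =>
    obtain ⟨o, seq⟩ := h
    obtain ⟨tl, hE⟩ := scanl_add_eq_cons ((a : Int) + seq.toList.length)
        ((t.map (fun p => (p.1, (p.2.toList.length : Int)))).map Prod.snd)
    have hne : List.scanl (· + ·) ((a : Int) + seq.toList.length)
        ((t.map (fun p => (p.1, (p.2.toList.length : Int)))).map Prod.snd) ≠ [] := by
      rw [hE]; simp
    have ih' := ih (a + seq.toList.length)
    have hcast : (((a + seq.toList.length : ℕ)) : Int) = (a : Int) + (seq.toList.length : Int) := by
      push_cast; ring
    rw [hcast, hE] at ih'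
    simp only [List.map_cons, List.scanl_cons, List.tail_cons, pseudoseq2prefixGo]
    rw [List.dropLast_cons_of_ne_nil hne, hE]
    simp only [List.tail_cons, List.zip_cons_cons, List.map_cons, List.cons.injEq] at ih' ⊢
    refine ⟨?_, ?_⟩
    · have h2 : (a : Int) + (seq.toList.length : Int) = ((a + seq.toList.length : ℕ) : Int) := by
        push_cast; ring
      rw [h2, PySem.List.slice_natCast]
      simp
    · rw [ih']
      simp [List.drop_drop]

-- ===== VERDICT (by name: the statement is the Claim_ definition above) =====
theorem pseudoseq2prefix_spec : Claim_equal_pseudoseq2prefix := by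
  intro pseq prefix_ _ _
  unfold Spec_pseudoseq2prefix pseudoseq2prefix pseudoseq2prefix_alt
  have := key prefix_ pseq.toList 0
  simpa using this
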